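-- pv_equiv track=rewrite | github.com/lil-sussy/Hum-skipping-YT | src/server/services/timeline_utils.py | fill_timeline_gaps
-- ===== SOURCE A (Python) =====
-- def fill_timeline_gaps(segments, gap_label='gap') -> list[tuple[int, int, str]]:
--     """
--     Fill gaps in a timeline with a specified label.
--
--     Args:
--         segments: List of tuples (start_ms, end_ms, label)
--                  Must be sorted by start_ms
--         gap_label: Label to use for filling gaps
--
--     Returns:
--         List of tuples (start_ms, end_ms, label) representing filled timeline
--     """
--     if not segments:
--         return []
--
--     # Sort segments by start time if not already sorted
--     segments = sorted(segments, key=lambda x: x[0])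
--
--     filled_timeline = []
--     current_end = segments[0][0]
--
--     # Add gap segment if there's a gap before first segment
--     if current_end > 0:
--         filled_timeline.append((0, current_end, gap_label))
--
--     for i, segment in enumerate(segments):
--         start_ms, end_ms, label = segment
--
--         # Check for gap between current and previous segment
--         if start_ms > current_end:
--             # Add gap segment
--             filled_timeline.append((current_end, start_ms, gap_label))
--
--         # Add main segment
--         filled_timeline.append(segment)
--         current_end = end_ms
--
--     return filled_timeline
-- ===== SOURCE B (Python) =====
-- def fill_timeline_gaps(segments, gap_label='gap') -> list[tuple[int, int, str]]:
--     segs = sorted(segments, key=lambda x: x[0])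
--     rev = []
--     for i in range(len(segs) - 1, -1, -1):
--         cur = segs[i]
--         rev.append(cur)
--         prev_end = segs[i - 1][1] if i > 0 else 0
--         if cur[0] > prev_end:
--             rev.append((prev_end, cur[0], gap_label))
--     return rev[::-1]
-- ===== Notes on version B (the rewrite author's own statement) =====
-- stated objective: alternative
-- what changed: Builds the filled timeline back-to-front: one reversed pass over the sorted list with a uniform rule (gap before segment i iff its start exceeds segs[i-1]'s end, 0 for the first), appending in reverse and reversing once at the end, instead of A's forward pass threading a current_end accumulator with separate pre-loop leading-gap handling.
import Mathlib
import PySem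

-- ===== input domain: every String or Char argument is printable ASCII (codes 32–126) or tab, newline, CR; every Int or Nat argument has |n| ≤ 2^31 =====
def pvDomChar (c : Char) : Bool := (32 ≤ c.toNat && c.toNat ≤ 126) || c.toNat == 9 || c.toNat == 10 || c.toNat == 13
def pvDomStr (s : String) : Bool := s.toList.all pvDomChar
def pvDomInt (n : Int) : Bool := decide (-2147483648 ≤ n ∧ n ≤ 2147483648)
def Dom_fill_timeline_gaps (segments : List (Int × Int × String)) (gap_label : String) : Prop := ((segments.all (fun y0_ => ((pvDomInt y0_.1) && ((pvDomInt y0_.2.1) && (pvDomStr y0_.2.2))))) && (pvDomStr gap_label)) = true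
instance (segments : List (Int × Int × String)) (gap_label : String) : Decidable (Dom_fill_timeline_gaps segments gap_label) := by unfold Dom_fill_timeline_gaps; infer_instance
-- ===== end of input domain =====

-- B walks the sorted segments BACK-TO-FRONT with one uniform rule (gap before segment i iff
-- start_i exceeds the predecessor's end, 0 for the first), building the reversed output and
-- reversing once at the end — no running current_end accumulator, no special pre-loop leading-gap
-- code (objective: alternative).

-- ===== PORT A =====
-- A's for-loop over the sorted segments, carrying (filled_timeline, current_end).
def fillLoopA (gap_label : String) (acc : List (Int × Int × String)) (current_end : Int) :
    List (Int × Int × String) → List (Int × Int × String)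
  | [] => acc
  | seg :: rest =>
    let acc' := if seg.1 > current_end then acc ++ [(current_end, seg.1, gap_label)] else acc
    fillLoopA gap_label (acc' ++ [seg]) seg.2.1 rest

def fill_timeline_gaps (segments : List (Int × Int × String)) (gap_label : String) : List (Int × Int × String) :=
  if segments = [] then []
  else
    let s := PySem.List.sorted segments (fun x => x.1)
    let current_end := (s.headI).1
    let filled := if current_end > 0 then [((0 : Int), current_end, gap_label)] else []
    fillLoopA gap_label filled current_end s

-- ===== PORT B =====
-- B's reversed index loop: structural recursion on the reversed sorted list; at each step the
-- predecessor's end is looked up as the head of the remaining reversed list (segs[i-1][1]), 0 at i = 0.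
def fillRevB (gap_label : String) : List (Int × Int × String) → List (Int × Int × String)
  | [] => []
  | cur :: rest =>
    let prev_end : Int := match rest with | [] => 0 | p :: _ => p.2.1
    cur :: ((if cur.1 > prev_end then [(prev_end, cur.1, gap_label)] else []) ++ fillRevB gap_label rest)

def fill_timeline_gaps_alt (segments : List (Int × Int × String)) (gap_label : String) : List (Int × Int × String) :=
  let s := PySem.List.sorted segments (fun x => x.1)
  (fillRevB gap_label s.reverse).reverse

-- ===== PRECONDITION & SPEC =====
def Spec_fill_timeline_gaps (segments : List (Int × Int × String)) (gap_label : String) (out : List (Int × Int × String)) : Prop := out = fill_timeline_gaps_alt segments gap_label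
instance (segments : List (Int × Int × String)) (gap_label : String) (out : List (Int × Int × String)) : Decidable (Spec_fill_timeline_gaps segments gap_label out) := by unfold Spec_fill_timeline_gaps; infer_instance

-- ===== CLAIM (what is proved, stated in full; the proofs are below) =====
def Claim_equal_fill_timeline_gaps : Prop := ∀ (segments : List (Int × Int × String)) (gap_label : String), Dom_fill_timeline_gaps segments gap_label → Spec_fill_timeline_gaps segments gap_label (fill_timeline_gaps segments gap_label)

-- ===== LEMMAS AND PROOFS =====

-- Common forward specification: fill, given the end of the (virtual) predecessor.
def Ffwd (gap_label : String) (prev_end : Int) : List (Int × Int × String) → List (Int × Int × String)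
  | [] => []
  | c :: r => (if c.1 > prev_end then [(prev_end, c.1, gap_label)] else []) ++ c :: Ffwd gap_label c.2.1 r

def lastEnd (pe : Int) (l : List (Int × Int × String)) : Int :=
  (l.getLast?).elim pe (fun p => p.2.1)

theorem lastEnd_cons (pe : Int) (c : Int × Int × String) (l : List (Int × Int × String)) :
    lastEnd pe (c :: l) = lastEnd c.2.1 l := by
  cases l with
  | nil => simp [lastEnd]
  | cons h t =>
    have hcc : (c :: h :: t).getLast? = (h :: t).getLast? := List.getLast?_cons_cons ..
    rcases hl : (h :: t).getLast? with _ | x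
    · simp [List.getLast?_eq_none_iff] at hl
    · simp [lastEnd, hcc, hl]

theorem fillLoopA_eq_Ffwd (gap_label : String) :
    ∀ (l : List (Int × Int × String)) (acc : List (Int × Int × String)) (ce : Int),
    fillLoopA gap_label acc ce l = acc ++ Ffwd gap_label ce l := by
  intro l
  induction l with
  | nil => intro acc ce; simp [fillLoopA, Ffwd]
  | cons c r ih =>
    intro acc ce
    simp only [fillLoopA, Ffwd, ih]
    split_ifs with h <;> simp

theorem Ffwd_snoc (gap_label : String) :
    ∀ (l : List (Int × Int × String)) (pe : Int) (x : Int × Int × String),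
    Ffwd gap_label pe (l ++ [x]) =
      Ffwd gap_label pe l ++
        (if x.1 > lastEnd pe l then [(lastEnd pe l, x.1, gap_label)] else []) ++ [x] := by
  intro l
  induction l with
  | nil => intro pe x; simp [Ffwd, lastEnd]
  | cons c r ih =>
    intro pe x
    simp only [List.cons_append, Ffwd, ih, lastEnd_cons]
    split_ifs with h <;> simp

theorem headEnd_eq_lastEnd_reverse (rest : List (Int × Int × String)) :
    (match rest with | [] => (0 : Int) | p :: _ => p.2.1) = lastEnd 0 rest.reverse := by
  cases rest with
  | nil => simp [lastEnd]
  | cons p r' => simp [lastEnd, List.getLast?_reverse]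

theorem fillRevB_reverse (gap_label : String) :
    ∀ (r : List (Int × Int × String)),
    (fillRevB gap_label r).reverse = Ffwd gap_label 0 r.reverse := by
  intro r
  induction r with
  | nil => simp [fillRevB, Ffwd]
  | cons cur rest ih =>
    rw [List.reverse_cons, Ffwd_snoc, ← ih]
    simp only [fillRevB, headEnd_eq_lastEnd_reverse, List.reverse_cons, List.reverse_append]
    split_ifs with h <;> simp

-- ===== VERDICT (by name: the statement is the Claim_ definition above) =====
theorem fill_timeline_gaps_spec : Claim_equal_fill_timeline_gaps := by
  intro segments gap_label _
  unfold Spec_fill_timeline_gaps fill_timeline_gaps fill_timeline_gaps_alt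
  by_cases hs : segments = []
  · simp [hs, PySem.List.sorted, fillRevB]
  · simp only [hs, ite_false]
    have hne : PySem.List.sorted segments (fun x => x.1) ≠ [] := by
      intro hnil
      have := PySem.List.sorted_perm (xs := segments) (key := fun x => x.1) (rev := false)
      rw [hnil] at this
      exact hs (this.nil_eq).symm
    obtain ⟨h, t, heq⟩ := List.exists_cons_of_ne_nil hne
    rw [heq, fillRevB_reverse, List.reverse_reverse]
    simp only [List.headI, fillLoopA, fillLoopA_eq_Ffwd, Ffwd]
    split_ifs with h1 h2 h2 <;> simp_all
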